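-- pv_equiv track=rewrite | github.com/scholl-lab/variantcentrifuge | variantcentrifuge/association/tests/allelic_series.py | _resolve_effect
-- ===== SOURCE A (Python) =====
-- PTV_EFFECTS = frozenset(
--     {
--         "stop_gained",
--         "frameshift_variant",
--         "splice_acceptor_variant",
--         "splice_donor_variant",
--     }
-- )
--
-- MISSENSE_EFFECT = "missense_variant"
--
-- def _resolve_effect(effect_str: str) -> str:
--     """Resolve '&'-concatenated SnpEff effect string to single highest-priority effect.
--
--     Priority: PTV effects > missense_variant > first part.
--     This handles multi-transcript annotations like 'stop_gained&splice_region_variant'.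
--
--     Parameters
--     ----------
--     effect_str : str
--         Raw SnpEff effect string, possibly containing '&'-delimited multi-transcript
--         annotations (e.g. 'stop_gained&splice_region_variant').
--
--     Returns
--     -------
--     str
--         The single highest-priority effect. Returns the input unchanged if no '&'
--         is present (fast path).
--     """
--     if "&" not in effect_str:
--         return effect_str
--     parts = [p.strip() for p in effect_str.split("&")]
--     for part in parts:
--         if part in PTV_EFFECTS:
--             return part
--     if MISSENSE_EFFECT in parts:
--         return MISSENSE_EFFECT
--     return parts[0] if parts else effect_str
-- ===== SOURCE B (Python) =====
-- PTV_EFFECTS = frozenset(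
--     {
--         "stop_gained",
--         "frameshift_variant",
--         "splice_acceptor_variant",
--         "splice_donor_variant",
--     }
-- )
--
-- MISSENSE_EFFECT = "missense_variant"
--
--
-- def _rank(part):
--     """Priority rank: PTV effects first, then missense, then anything else."""
--     if part in PTV_EFFECTS:
--         return 0
--     if part == MISSENSE_EFFECT:
--         return 1
--     return 2
--
--
-- def _resolve_effect(effect_str: str) -> str:
--     if "&" not in effect_str:
--         return effect_str
--     parts = [p.strip() for p in effect_str.split("&")]
--     # min is stable: the first part of minimal rank wins, which reproduces
--     # first-PTV, then missense, then parts[0].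
--     return min(parts, key=_rank)
-- ===== Notes on version B (the rewrite author's own statement) =====
-- stated objective: simpler
-- what changed: Replaces the two ordered scans (first-PTV loop, then membership test, then parts[0] fallback) by a single stable min over a three-level priority rank function.
import Mathlib
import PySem

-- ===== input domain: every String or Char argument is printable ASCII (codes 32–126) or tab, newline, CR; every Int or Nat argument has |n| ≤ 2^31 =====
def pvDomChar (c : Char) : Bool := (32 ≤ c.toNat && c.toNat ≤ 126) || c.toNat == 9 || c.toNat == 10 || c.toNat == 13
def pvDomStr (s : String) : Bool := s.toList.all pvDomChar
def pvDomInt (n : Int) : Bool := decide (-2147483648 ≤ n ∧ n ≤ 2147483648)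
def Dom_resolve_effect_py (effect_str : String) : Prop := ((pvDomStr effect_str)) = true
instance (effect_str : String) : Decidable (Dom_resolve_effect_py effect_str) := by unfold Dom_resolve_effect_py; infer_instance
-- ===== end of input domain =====

-- B replaces A's two ordered scans (first-PTV loop, missense membership test, parts[0] fallback)
-- by a single stable min over a three-level priority rank; objective: simpler.


-- ===== PORT A =====
def pvPTV_EFFECTS : PySem.Set String :=
  PySem.Set.ofList ["stop_gained", "frameshift_variant", "splice_acceptor_variant", "splice_donor_variant"]

def pvMISSENSE_EFFECT : String := "missense_variant"

def resolve_effect_py (effect_str : String) : String :=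
  if PySem.Str.isIn "&" effect_str = false then effect_str
  else
    let parts := ((PySem.Str.split? effect_str "&").getD []).map PySem.Str.strip
    -- 'for part in parts: if part in PTV_EFFECTS: return part' = first match
    match parts.find? (fun part => pvPTV_EFFECTS.contains part) with
    | some part => part
    | none =>
      if parts.contains pvMISSENSE_EFFECT then pvMISSENSE_EFFECT
      else match parts with
        | [] => effect_str
        | p :: _ => p

-- ===== PORT B =====
def pvRank (part : String) : Int :=
  if pvPTV_EFFECTS.contains part then 0
  else if part = pvMISSENSE_EFFECT then 1
  else 2

def resolve_effect_py_alt (effect_str : String) : String :=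
  if PySem.Str.isIn "&" effect_str = false then effect_str
  else
    let parts := ((PySem.Str.split? effect_str "&").getD []).map PySem.Str.strip
    (PySem.List.min? parts pvRank).getD effect_str

-- ===== PRECONDITION & SPEC =====
def Spec_resolve_effect_py (effect_str : String) (out : String) : Prop := out = resolve_effect_py_alt effect_str
instance (effect_str : String) (out : String) : Decidable (Spec_resolve_effect_py effect_str out) := by unfold Spec_resolve_effect_py; infer_instance

-- ===== CLAIM (what is proved, stated in full; the proofs are below) =====
def Claim_equal_resolve_effect_py : Prop := ∀ (effect_str : String), Dom_resolve_effect_py effect_str → Spec_resolve_effect_py effect_str (resolve_effect_py effect_str)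

-- ===== LEMMAS AND PROOFS =====

/-- A's tail computation on a running best `acc` and remaining parts `t`. -/
def pvARes (acc : String) (t : List String) : String :=
  if pvPTV_EFFECTS.contains acc then acc
  else match t.find? (fun p => pvPTV_EFFECTS.contains p) with
    | some p => p
    | none =>
      if acc = pvMISSENSE_EFFECT then acc
      else if t.contains pvMISSENSE_EFFECT then pvMISSENSE_EFFECT
      else acc

/-- The running step of `PySem.List.min?` (pointwise equal to its fold step). -/
def pvStep (a : Option String) (x : String) : Option String :=
  match a with
  | none => some x
  | some m => if pvRank x < pvRank m then some x else some m

lemma pv_min?_eq_foldl (xs : List String) :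
    PySem.List.min? xs pvRank = List.foldl pvStep none xs := by
  unfold PySem.List.min?
  apply PySem.List.foldl_congr_mem
  intro a x _
  cases a <;> rfl

lemma pvPTV_miss : ¬ (pvMISSENSE_EFFECT ∈ pvPTV_EFFECTS) := by decide

lemma pv_foldl_min (t : List String) (acc : String) :
    t.foldl pvStep (some acc) = some (pvARes acc t) := by
  induction t generalizing acc with
  | nil =>
    simp only [List.foldl_nil, pvARes, List.find?_nil, List.contains_nil]
    split_ifs <;> simp_all
  | cons y t ih =>
    rw [List.foldl_cons]
    by_cases hA : acc ∈ pvPTV_EFFECTS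
    · have hstep : pvStep (some acc) y = some acc := by
        simp [pvStep, pvRank, hA]; split_ifs <;> omega
      rw [hstep, ih]
      simp [pvARes, hA]
    · by_cases hY : y ∈ pvPTV_EFFECTS
      · have hstep : pvStep (some acc) y = some y := by
          simp [pvStep, pvRank, hY]; split_ifs <;> simp_all
        rw [hstep, ih]
        simp [pvARes, hA, hY]
      · by_cases hAm : acc = pvMISSENSE_EFFECT
        · have hstep : pvStep (some acc) y = some acc := by
            simp [pvStep, pvRank, hY, hAm, pvMISSENSE_EFFECT]
            split_ifs <;> simp_all [pvMISSENSE_EFFECT]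
          rw [hstep, ih]
          simp [pvARes, hY, hAm]
        · by_cases hYm : y = pvMISSENSE_EFFECT
          · have hstep : pvStep (some acc) y = some y := by
              simp [pvStep, pvRank, hA, hAm, hYm, pvPTV_miss]
            rw [hstep, ih]
            simp only [pvARes, List.find?_cons, List.contains_cons]
            simp only [hYm,
              show (pvPTV_EFFECTS.contains acc) = false by simpa using hA,
              Bool.false_eq_true, if_false, if_neg hAm,
              show (pvPTV_EFFECTS.contains pvMISSENSE_EFFECT) = false by simpa using pvPTV_miss]
            cases hf : t.find? (fun p => pvPTV_EFFECTS.contains p) <;> simp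
          · have hstep : pvStep (some acc) y = some acc := by
              simp [pvStep, pvRank, hA, hY, hAm, hYm]
            rw [hstep, ih]
            simp only [pvARes, List.find?_cons, List.contains_cons]
            simp only [show (pvPTV_EFFECTS.contains y) = false by simpa using hY,
              show (pvPTV_EFFECTS.contains acc) = false by simpa using hA,
              Bool.false_eq_true, if_false, if_neg hAm]
            cases hf : t.find? (fun p => pvPTV_EFFECTS.contains p) <;>
              simp [Ne.symm hYm]

lemma pv_core (effect_str : String) (parts : List String) :
    (match parts.find? (fun part => pvPTV_EFFECTS.contains part) with
      | some part => part
      | none =>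
        if parts.contains pvMISSENSE_EFFECT then pvMISSENSE_EFFECT
        else match parts with
          | [] => effect_str
          | p :: _ => p)
    = (PySem.List.min? parts pvRank).getD effect_str := by
  rw [pv_min?_eq_foldl]
  cases parts with
  | nil => rfl
  | cons x t =>
    rw [List.foldl_cons, show pvStep none x = some x from rfl, pv_foldl_min t x]
    simp only [Option.getD_some, pvARes]
    by_cases hX : x ∈ pvPTV_EFFECTS
    · simp [hX]
    · simp only [List.find?_cons, List.contains_cons]
      simp only [show (pvPTV_EFFECTS.contains x) = false by simpa using hX]
      cases hf : t.find? (fun p => pvPTV_EFFECTS.contains p) with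
      | some p => simp
      | none =>
        by_cases hXm : x = pvMISSENSE_EFFECT
        · simp [hXm]
        · simp [hXm, Ne.symm hXm]

-- ===== VERDICT (by name: the statement is the Claim_ definition above) =====
theorem resolve_effect_py_spec : Claim_equal_resolve_effect_py := by
  intro effect_str _
  show resolve_effect_py effect_str = resolve_effect_py_alt effect_str
  unfold resolve_effect_py resolve_effect_py_alt
  by_cases h : PySem.Str.isIn "&" effect_str = false
  · rw [if_pos h, if_pos h]
  · rw [if_neg h, if_neg h]
    exact pv_core effect_str _
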